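-- pv_equiv track=rewrite | github.com/thatguyovathea/biz-prospector | src/enrichment/contacts.py | _pick_best_contact
-- ===== SOURCE A (Python) =====
-- TARGET_TITLES = [
--     "owner",
--     "founder",
--     "ceo",
--     "president",
--     "general manager",
--     "operations manager",
--     "office manager",
--     "managing partner",
--     "partner",
--     "director of operations",
--     "vp operations",
--     "chief operating officer",
--     "coo",
--     "administrator",
-- ]
--
-- def _title_priority(title: str) -> int:
--     """Lower number = higher priority contact."""
--     title_lower = title.lower()
--     for i, target in enumerate(TARGET_TITLES):
--         if target in title_lower:
--             return i
--     return 999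
--
-- def _pick_best_contact(people: list[dict]) -> dict | None:
--     """Pick the best contact from a list based on title priority and email availability."""
--     # Filter to those with emails
--     with_email = [p for p in people if p.get("email")]
--     if not with_email:
--         # Fall back to anyone with a name
--         with_email = [p for p in people if p.get("name")]
--     if not with_email:
--         return None
--
--     # Sort by title priority
--     with_email.sort(key=lambda p: _title_priority(p.get("title", "")))
--     return with_email[0]
-- ===== SOURCE B (Python) =====
-- TARGET_TITLES = [
--     "owner",
--     "founder",
--     "ceo",
--     "president",
--     "general manager",
--     "operations manager",
--     "office manager",
--     "managing partner",
--     "partner",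
--     "director of operations",
--     "vp operations",
--     "chief operating officer",
--     "coo",
--     "administrator",
-- ]
--
-- def _title_priority(title: str) -> int:
--     """Lower number = higher priority contact."""
--     title_lower = title.lower()
--     for i, target in enumerate(TARGET_TITLES):
--         if target in title_lower:
--             return i
--     return 999
--
-- def _better(best, p):
--     """p replaces best iff best is None or p has a strictly smaller title priority."""
--     if best is None or _title_priority(p.get("title", "")) < _title_priority(best.get("title", "")):
--         return p
--     return best
--
-- def _pick_best_contact(people: list[dict]) -> dict | None:
--     """One pass: track the first highest-priority email-holder and name-holder."""
--     best_email = None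
--     best_name = None
--     for p in people:
--         if p.get("email"):
--             best_email = _better(best_email, p)
--         if p.get("name"):
--             best_name = _better(best_name, p)
--     return best_email if best_email is not None else best_name
-- ===== Notes on version B (the rewrite author's own statement) =====
-- stated objective: alternative
-- what changed: Replaced filter-then-stable-sort-and-take-first by a single pass over people that keeps the first highest-priority email-holder and name-holder with strict-less updates.
import Mathlib
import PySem

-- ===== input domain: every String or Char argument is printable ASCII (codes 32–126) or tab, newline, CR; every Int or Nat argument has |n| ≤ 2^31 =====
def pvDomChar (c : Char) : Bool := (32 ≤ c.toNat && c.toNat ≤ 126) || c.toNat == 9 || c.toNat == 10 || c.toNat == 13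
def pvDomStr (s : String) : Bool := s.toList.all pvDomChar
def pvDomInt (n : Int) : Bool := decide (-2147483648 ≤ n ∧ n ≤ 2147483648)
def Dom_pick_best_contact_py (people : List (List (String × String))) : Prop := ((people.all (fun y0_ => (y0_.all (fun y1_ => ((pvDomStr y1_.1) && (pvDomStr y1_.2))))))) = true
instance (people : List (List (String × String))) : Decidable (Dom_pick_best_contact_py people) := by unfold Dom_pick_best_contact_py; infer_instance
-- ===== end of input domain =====

-- B replaces A's filter + stable sort by a single pass keeping the first highest-priority
-- email-holder and name-holder (strict-less updates); return value only, no mutation claimed.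

-- ===== PORT A =====
-- module-level helpers shared by both Pythons
def TARGET_TITLES : List String :=
  ["owner", "founder", "ceo", "president", "general manager", "operations manager",
   "office manager", "managing partner", "partner", "director of operations",
   "vp operations", "chief operating officer", "coo", "administrator"]

-- the 'for i, target in enumerate(TARGET_TITLES)' loop of _title_priority
def titleLoop (tl : String) : List String → Int → Int
  | [], _ => 999
  | t :: rest, i => if PySem.Str.isIn t tl then i else titleLoop tl rest (i + 1)

def title_priority (title : String) : Int :=
  titleLoop (PySem.Str.lower title) TARGET_TITLES 0

-- p.get(k) / p.get(k, d) on the association-list dict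
def dget? (p : List (String × String)) (k : String) : Option String :=
  PySem.Dict.get? (PySem.Dict.mk p) k

def dgetD (p : List (String × String)) (k : String) (d : String) : String :=
  PySem.Dict.getD (PySem.Dict.mk p) k d

-- Python truthiness of an Optional[str]
def truthy (o : Option String) : Bool :=
  match o with
  | none => false
  | some s => !(s == "")

def pick_best_contact_py (people : List (List (String × String))) : Option (List (String × String)) :=
  let with_email := people.filter (fun p => truthy (dget? p "email"))
  let with_email2 := if with_email.isEmpty then people.filter (fun p => truthy (dget? p "name")) else with_email
  if with_email2.isEmpty then none
  else PySem.List.pyGet?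
    (PySem.List.sorted with_email2 (fun p => title_priority (dgetD p "title" "")) false) 0

-- ===== PORT B =====
-- _better(best, p): p replaces best iff best is None or p has strictly smaller priority
def better (best : Option (List (String × String))) (p : List (String × String)) : Option (List (String × String)) :=
  match best with
  | none => some p
  | some q =>
    if title_priority (dgetD p "title" "") < title_priority (dgetD q "title" "") then some p
    else some q

def pick_best_contact_py_alt (people : List (List (String × String))) : Option (List (String × String)) :=
  let st := people.foldl
    (fun (st : Option (List (String × String)) × Option (List (String × String))) p =>
      (if truthy (dget? p "email") then better st.1 p else st.1,
       if truthy (dget? p "name") then better st.2 p else st.2))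
    (none, none)
  match st.1 with
  | some q => some q
  | none => st.2

-- ===== PRECONDITION & SPEC =====
def Spec_pick_best_contact_py (people : List (List (String × String))) (out : Option (List (String × String))) : Prop := out = pick_best_contact_py_alt people
instance (people : List (List (String × String))) (out : Option (List (String × String))) : Decidable (Spec_pick_best_contact_py people out) := by unfold Spec_pick_best_contact_py; infer_instance

-- ===== CLAIM (what is proved, stated in full; the proofs are below) =====
def Claim_equal_pick_best_contact_py : Prop := ∀ (people : List (List (String × String))), Dom_pick_best_contact_py people → Spec_pick_best_contact_py people (pick_best_contact_py people)

-- ===== LEMMAS AND PROOFS =====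
lemma head?_insertBy (x : List (String × String)) (acc : List (List (String × String))) :
    (PySem.List.insertBy (fun a b => decide (title_priority (dgetD a "title" "") < title_priority (dgetD b "title" ""))) x acc).head? =
      better acc.head? x := by
  cases acc with
  | nil => simp [PySem.List.insertBy, better]
  | cons y ys =>
    by_cases h : title_priority (dgetD x "title" "") < title_priority (dgetD y "title" "") <;>
      simp [PySem.List.insertBy, better, h]

lemma head?_foldl_insertBy :
    ∀ (xs acc : List (List (String × String))),
      (xs.foldl (fun a x => PySem.List.insertBy (fun a b => decide (title_priority (dgetD a "title" "") < title_priority (dgetD b "title" ""))) x a) acc).head? =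
        xs.foldl better acc.head?
  | [], _ => rfl
  | x :: xs, acc => by
    simp only [List.foldl_cons]
    rw [head?_foldl_insertBy xs, head?_insertBy]

lemma sorted_head? (xs : List (List (String × String))) :
    (PySem.List.sorted xs (fun p => title_priority (dgetD p "title" "")) false).head? =
      xs.foldl better none := by
  rw [PySem.List.sorted_eq_foldl_insertBy]
  exact head?_foldl_insertBy xs []

lemma foldl_better_some :
    ∀ (xs : List (List (String × String))) (q : List (String × String)),
      xs.foldl better (some q) ≠ none
  | [], _ => by simp
  | x :: xs, q => by
    simp only [List.foldl_cons, better]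
    split <;> exact foldl_better_some xs _

lemma foldl_better_of_ne_nil (xs : List (List (String × String))) (h : xs ≠ []) :
    xs.foldl better none ≠ none := by
  cases xs with
  | nil => exact absurd rfl h
  | cons x t => simpa only [List.foldl_cons, better] using foldl_better_some t x

lemma alt_eq (people : List (List (String × String))) :
    pick_best_contact_py_alt people =
      match (people.filter (fun p => truthy (dget? p "email"))).foldl better none with
      | some q => some q
      | none => (people.filter (fun p => truthy (dget? p "name"))).foldl better none := by
  simp only [pick_best_contact_py_alt]
  rw [PySem.List.foldl_prod_mk
        (f := fun acc p => if truthy (dget? p "email") then better acc p else acc)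
        (g := fun acc p => if truthy (dget? p "name") then better acc p else acc),
      PySem.List.foldl_if_eq_foldl_filter, PySem.List.foldl_if_eq_foldl_filter]

-- ===== VERDICT (by name: the statement is the Claim_ definition above) =====
theorem pick_best_contact_py_spec : Claim_equal_pick_best_contact_py := by
  intro people _
  unfold Spec_pick_best_contact_py
  rw [alt_eq]
  simp only [pick_best_contact_py]
  by_cases he : people.filter (fun p => truthy (dget? p "email")) = []
  · rw [if_pos (by simp [he] :
        (people.filter (fun p => truthy (dget? p "email"))).isEmpty = true)]
    rw [he]
    by_cases hn : people.filter (fun p => truthy (dget? p "name")) = []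
    · rw [if_pos (by simp [hn] :
          (people.filter (fun p => truthy (dget? p "name"))).isEmpty = true), hn]
      rfl
    · rw [if_neg (by simp [hn])]
      rw [PySem.List.pyGet?_zero, ← List.head?_eq_getElem?, sorted_head?]
      rfl
  · rw [if_neg (by simp [he])]
    rw [if_neg (by simp [he])]
    rw [PySem.List.pyGet?_zero, ← List.head?_eq_getElem?, sorted_head?]
    rcases ho : (people.filter (fun p => truthy (dget? p "email"))).foldl better none with _ | q
    · exact absurd ho (foldl_better_of_ne_nil _ he)
    · rfl
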